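-- pv_equiv track=rewrite | github.com/Noamshabat1/Backtracking-solution-finder | puzzle_solver.py | checking_the_length_of_the_possible_cells_up
-- ===== SOURCE A (Python) =====
-- from typing import List, Tuple, Set, Optional
--
-- WHITE = 1
--
-- BLACK = 0
--
-- def coord_is_valid(row: int, col: int, picture: List[List[int]],
--                    unknown_is_white: bool) -> bool:
--     """
--     this func is checking and doing validation if the coordinates are valid.
--     :param row: the row of the value by index.
--     :param col: the col of the value by index.
--     :param picture: an 2D list that contain the data of the board.
--     :param unknown_is_white: unknown Square with value if its white or black.
--     :return: true if the val is white and in the right coords and false if the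
--     val is not right.
--     """
--     if row >= len(picture) or col >= len(picture[0]) or row < 0 or col < 0:
--         return False
--
--     if unknown_is_white:
--         if picture[row][col] == BLACK:
--             return False
--     else:
--         if picture[row][col] != WHITE:
--             return False
--
--     return True
--
-- def checking_the_length_of_the_possible_cells_up(row, col, picture,
--                                                  unknown_is_white,
--                                                  counter=0) -> int:
--     """
--     this func is checking how many cells the sol one can see in a single
--     moment above him.
--     :param row: the row of the cell that we check.
--     :param col: the col of the cell that we check.
--     :param picture: an 2D list that contain the data of the board.
--     :param unknown_is_white: unknown Square with value if its white or black.
--     :param counter: count how many cells there is.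
--     :return: the counter of how many.
--     """
--     if not coord_is_valid(row, col, picture, unknown_is_white):
--         return counter
--     return checking_the_length_of_the_possible_cells_up(row - 1, col, picture,
--                                                         unknown_is_white,
--                                                         counter + 1)
-- ===== SOURCE B (Python) =====
-- def checking_the_length_of_the_possible_cells_up(row, col, picture,
--                                                  unknown_is_white,
--                                                  counter=0):
--     if row >= len(picture) or row < 0 or col < 0 or col >= len(picture[0]):
--         return counter
--     count = 0
--     for cells in reversed(picture[:row + 1]):
--         val = cells[col]
--         if (val == 0) if unknown_is_white else (val != 1):
--             break
--         count += 1
--     return counter + count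
-- ===== Notes on version B (the rewrite author's own statement) =====
-- stated objective: alternative
-- what changed: Replaces A's tail recursion that re-validates bounds via coord_is_valid at every step with a single bounds check up front followed by counting the leading valid cells of the reversed row prefix picture[:row+1] with a for/break loop.
import Mathlib
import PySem

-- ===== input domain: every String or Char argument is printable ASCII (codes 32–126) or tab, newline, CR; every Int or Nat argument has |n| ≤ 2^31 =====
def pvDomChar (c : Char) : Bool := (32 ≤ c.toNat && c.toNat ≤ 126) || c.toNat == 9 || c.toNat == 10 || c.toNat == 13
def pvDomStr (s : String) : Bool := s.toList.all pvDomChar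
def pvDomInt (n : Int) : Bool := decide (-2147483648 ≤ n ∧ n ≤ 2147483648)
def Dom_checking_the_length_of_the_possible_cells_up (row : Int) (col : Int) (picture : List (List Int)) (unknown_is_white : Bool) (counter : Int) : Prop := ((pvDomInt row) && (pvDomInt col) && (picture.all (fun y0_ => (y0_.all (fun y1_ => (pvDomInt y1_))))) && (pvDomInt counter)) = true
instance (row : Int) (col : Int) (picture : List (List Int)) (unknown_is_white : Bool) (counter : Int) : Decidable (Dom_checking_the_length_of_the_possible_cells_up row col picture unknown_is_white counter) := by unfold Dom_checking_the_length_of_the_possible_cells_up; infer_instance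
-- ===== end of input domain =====

-- B replaces A's per-step coord_is_valid tail recursion by one up-front bounds check plus a
-- for/break count over the reversed prefix picture[:row+1]; a genuinely different decomposition, same cost.


-- ===== PORT A =====
-- coord_is_valid; picture[0] / picture[row][col] ported with pyGetD (in range under Pre_)
def pvCoordIsValid (row : Int) (col : Int) (picture : List (List Int)) (unknown_is_white : Bool) : Bool :=
  if row ≥ PySem.List.len picture ∨ col ≥ PySem.List.len (PySem.List.pyGetD picture 0 []) ∨ row < 0 ∨ col < 0 then
    false
  else
    let v := PySem.List.pyGetD (PySem.List.pyGetD picture row []) col 0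
    if unknown_is_white then
      if v = 0 then false else true
    else
      if v ≠ 1 then false else true

theorem pvCoordIsValid_row_bounds {row col : Int} {picture : List (List Int)} {u : Bool}
    (h : pvCoordIsValid row col picture u = true) : 0 ≤ row ∧ row < (picture.length : Int) := by
  unfold pvCoordIsValid at h
  split at h
  · simp at h
  · rename_i hg
    simp [PySem.List.len_eq] at hg
    omega

def checking_the_length_of_the_possible_cells_up (row : Int) (col : Int) (picture : List (List Int)) (unknown_is_white : Bool) (counter : Int) : Int :=
  if pvCoordIsValid row col picture unknown_is_white = true then
    checking_the_length_of_the_possible_cells_up (row - 1) col picture unknown_is_white (counter + 1)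
  else
    counter
termination_by (row + 1).toNat
decreasing_by
  have := pvCoordIsValid_row_bounds (by assumption)
  omega

-- ===== PORT B =====
-- the for/break loop over the reversed prefix: stops at the first invalid cell
def pvCountUp (unknown_is_white : Bool) (col : Int) : List (List Int) → Int
  | [] => 0
  | cells :: rest =>
    let val := PySem.List.pyGetD cells col 0
    if (if unknown_is_white then val = 0 else val ≠ 1) then 0
    else 1 + pvCountUp unknown_is_white col rest

def checking_the_length_of_the_possible_cells_up_alt (row : Int) (col : Int) (picture : List (List Int)) (unknown_is_white : Bool) (counter : Int) : Int :=
  if row ≥ PySem.List.len picture ∨ row < 0 ∨ col < 0 ∨ col ≥ PySem.List.len (PySem.List.pyGetD picture 0 []) then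
    counter
  else
    counter + pvCountUp unknown_is_white col ((PySem.List.slice picture none (some (row + 1))).reverse)

-- ===== PRECONDITION & SPEC =====
-- a row is "good" for the upward scan if col is in range for it and its cell does not stop the scan
def pvGood (unknown_is_white : Bool) (col : Int) (r : List Int) : Bool :=
  decide (col < (r.length : Int)) &&
    !(if unknown_is_white then PySem.List.pyGetD r col 0 == 0 else PySem.List.pyGetD r col 0 != 1)

-- Pre_ excludes exactly the inputs on which the Python A raises IndexError: an empty picture with
-- negative row, and pictures where the first stopping row of the upward scan from `row` is a ragged
-- row shorter than col+1 (so picture[r][col] is accessed out of range) rather than a blocking cell.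
def Pre_checking_the_length_of_the_possible_cells_up (row : Int) (col : Int) (picture : List (List Int)) (unknown_is_white : Bool) (counter : Int) : Prop :=
  (picture = [] → 0 ≤ row) ∧
  ((0 ≤ row ∧ row < (picture.length : Int) ∧ 0 ≤ col ∧ col < ((picture.getD 0 []).length : Int)) →
    (((picture.take (row + 1).toNat).reverse.dropWhile (pvGood unknown_is_white col)).head?.all
      (fun r => decide (col < (r.length : Int)))) = true)
instance (row : Int) (col : Int) (picture : List (List Int)) (unknown_is_white : Bool) (counter : Int) : Decidable (Pre_checking_the_length_of_the_possible_cells_up row col picture unknown_is_white counter) := by unfold Pre_checking_the_length_of_the_possible_cells_up; infer_instance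

def pvWitness_checking_the_length_of_the_possible_cells_up : Int × Int × List (List Int) × Bool × Int := (1, 0, [[1], [1]], true, 0)

def Spec_checking_the_length_of_the_possible_cells_up (row : Int) (col : Int) (picture : List (List Int)) (unknown_is_white : Bool) (counter : Int) (out : Int) : Prop := out = checking_the_length_of_the_possible_cells_up_alt row col picture unknown_is_white counter
instance (row : Int) (col : Int) (picture : List (List Int)) (unknown_is_white : Bool) (counter : Int) (out : Int) : Decidable (Spec_checking_the_length_of_the_possible_cells_up row col picture unknown_is_white counter out) := by unfold Spec_checking_the_length_of_the_possible_cells_up; infer_instance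

-- ===== CLAIM (what is proved, stated in full; the proofs are below) =====
def Claim_equal_checking_the_length_of_the_possible_cells_up : Prop := ∀ (row : Int) (col : Int) (picture : List (List Int)) (unknown_is_white : Bool) (counter : Int), Dom_checking_the_length_of_the_possible_cells_up row col picture unknown_is_white counter → Pre_checking_the_length_of_the_possible_cells_up row col picture unknown_is_white counter → Spec_checking_the_length_of_the_possible_cells_up row col picture unknown_is_white counter (checking_the_length_of_the_possible_cells_up row col picture unknown_is_white counter)


-- ===== LEMMAS AND PROOFS =====

-- main loop equivalence on the in-range rows (both ports read the same pyGetD cell terms)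
theorem pv_loop_eq (col : Int) (picture : List (List Int)) (u : Bool)
    (hc0 : 0 ≤ col) (hc1 : col < ((picture.getD 0 []).length : Int)) :
    ∀ n : Nat, n < picture.length →
      ∀ counter : Int,
        checking_the_length_of_the_possible_cells_up (n : Int) col picture u counter
          = counter + pvCountUp u col ((picture.take (n + 1)).reverse) := by
  have hc1' : col < (PySem.List.len (PySem.List.pyGetD picture 0 [])) := by
    rw [PySem.List.pyGetD_zero, PySem.List.len_eq]; exact hc1
  intro n
  induction n with
  | zero =>
    intro hn counter
    have htake : picture.take 1 = [picture[0]] := by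
      cases picture with
      | nil => simp at hn
      | cons a l => simp
    have hget : PySem.List.pyGetD picture (0 : Int) [] = picture[0] := by
      rw [PySem.List.pyGetD_eq_getElem picture [] (by omega) (by exact_mod_cast hn)]
      simp
    have hguard : ¬((0 : Int) ≥ PySem.List.len picture ∨ col ≥ PySem.List.len (PySem.List.pyGetD picture 0 []) ∨ (0:Int) < 0 ∨ col < 0) := by
      simp only [PySem.List.len_eq]
      push_neg
      refine ⟨by exact_mod_cast hn, by rw [← PySem.List.len_eq]; exact_mod_cast hc1', by omega, hc0⟩
    have hvv : pvCoordIsValid (0 : Int) col picture u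
        = (if (if u then PySem.List.pyGetD picture[0] col 0 = 0 else PySem.List.pyGetD picture[0] col 0 ≠ 1) then false else true) := by
      unfold pvCoordIsValid
      rw [if_neg hguard, hget]
      simp only [ne_eq]
      split_ifs <;> simp_all
    rw [checking_the_length_of_the_possible_cells_up]
    simp only [Nat.cast_zero]
    rw [hvv, htake]
    simp only [List.reverse_cons, List.reverse_nil, List.nil_append]
    simp only [pvCountUp]
    by_cases hcond : (if u then PySem.List.pyGetD picture[0] col 0 = 0 else PySem.List.pyGetD picture[0] col 0 ≠ 1)
    · rw [if_pos hcond, if_pos hcond]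
      simp
    · rw [if_neg hcond, if_neg hcond, if_pos rfl]
      rw [checking_the_length_of_the_possible_cells_up]
      have hinv : pvCoordIsValid ((0:Int) - 1) col picture u = false := by
        unfold pvCoordIsValid
        rw [if_pos]; right; right; left; omega
      rw [hinv]
      simp only [Bool.false_eq_true, if_false]
      omega
  | succ n ih =>
    intro hn counter
    have hn' : n < picture.length := by omega
    have htake : picture.take (n + 1 + 1) = picture.take (n+1) ++ [picture[n+1]] := by
      rw [List.take_add_one]
      simp [List.getElem?_eq_getElem hn]
    have hget : PySem.List.pyGetD picture ((n:Int) + 1) [] = picture[n+1] := by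
      rw [PySem.List.pyGetD_eq_getElem picture [] (by omega) (by exact_mod_cast hn)]
      congr 1
    have hguard : ¬(((n:Int)+1) ≥ PySem.List.len picture ∨ col ≥ PySem.List.len (PySem.List.pyGetD picture 0 []) ∨ ((n:Int)+1) < 0 ∨ col < 0) := by
      simp only [PySem.List.len_eq]
      push_neg
      refine ⟨by exact_mod_cast hn, by rw [← PySem.List.len_eq]; exact_mod_cast hc1', by omega, hc0⟩
    have hvv : pvCoordIsValid ((n:Int) + 1) col picture u
        = (if (if u then PySem.List.pyGetD picture[n+1] col 0 = 0 else PySem.List.pyGetD picture[n+1] col 0 ≠ 1) then false else true) := by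
      unfold pvCoordIsValid
      rw [if_neg hguard, hget]
      simp only [ne_eq]
      split_ifs <;> simp_all
    have hcast : ((n+1 : Nat) : Int) = (n : Int) + 1 := by push_cast; ring
    rw [checking_the_length_of_the_possible_cells_up, hcast, hvv, htake, List.reverse_append]
    simp only [List.reverse_cons, List.reverse_nil, List.nil_append, List.singleton_append]
    simp only [pvCountUp]
    by_cases hcond : (if u then PySem.List.pyGetD picture[n+1] col 0 = 0 else PySem.List.pyGetD picture[n+1] col 0 ≠ 1)
    · rw [if_pos hcond, if_pos hcond]
      simp
    · rw [if_neg hcond, if_neg hcond, if_pos rfl]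
      have hstep : (n : Int) + 1 - 1 = (n : Int) := by ring
      rw [hstep, ih hn' (counter + 1)]
      omega

-- ===== VERDICT (by name: the statement is the Claim_ definition above) =====
theorem checking_the_length_of_the_possible_cells_up_spec : Claim_equal_checking_the_length_of_the_possible_cells_up := by
  intro row col picture u counter _hdom _hpre
  unfold Spec_checking_the_length_of_the_possible_cells_up
  unfold checking_the_length_of_the_possible_cells_up_alt
  by_cases hbad : row ≥ PySem.List.len picture ∨ row < 0 ∨ col < 0 ∨ col ≥ PySem.List.len (PySem.List.pyGetD picture 0 [])
  · rw [if_pos hbad]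
    rw [checking_the_length_of_the_possible_cells_up]
    have : pvCoordIsValid row col picture u = false := by
      unfold pvCoordIsValid
      rw [if_pos]; tauto
    simp [this]
  · push_neg at hbad
    obtain ⟨hsm, hr0, hc0, hc1⟩ := hbad
    rw [if_neg (by push_neg; exact ⟨hsm, hr0, hc0, hc1⟩)]
    simp only [PySem.List.len_eq] at hsm
    have hc1' : col < ((picture.getD 0 []).length : Int) := by
      rw [PySem.List.pyGetD_zero, PySem.List.len_eq] at hc1; exact hc1
    have hrow : row = ((row.toNat : Nat) : Int) := by omega
    have hlt : row.toNat < picture.length := by omega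
    have hslice : PySem.List.slice picture none (some (row + 1)) = picture.take (row.toNat + 1) := by
      have : row + 1 = ((row.toNat + 1 : Nat) : Int) := by omega
      rw [this, PySem.List.slice_to_natCast]
    rw [hslice]
    rw [hrow]
    exact pv_loop_eq col picture u hc0 hc1' row.toNat hlt counter
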